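-- pv_equiv track=rewrite | github.com/khaled-ha/solved_issues | leaderboard/leaderboard.py | get_new_position
-- ===== SOURCE A (Python) =====
-- def get_new_position(player_position, ranked, i):
--     while i!=-1:
--         if player_position < ranked[i]:
--             #for v in range(i+1, i):
--             #    ranked.pop(v)
--             return i +2
--         if player_position == ranked[i]:
--             #for v in range(i+1, i):
--             #    ranked.pop(v)
--             return i + 1
--         ranked.pop(i)
--         i -= 1
--     return 1
-- ===== SOURCE B (Python) =====
-- def get_new_position(player_position, ranked, i):
--     # Forward scan: j = last index k <= i with player_position <= ranked[k] (or -1).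
--     j = -1
--     for k in range(i + 1):
--         if player_position <= ranked[k]:
--             j = k
--     # One slice delete reproduces A's per-element pops of indices j+1..i.
--     del ranked[j + 1:i + 1]
--     if j == -1:
--         return 1
--     return j + 1 if player_position == ranked[j] else j + 2
-- ===== Notes on version B (the rewrite author's own statement) =====
-- stated objective: alternative
-- what changed: Replaces A's destructive top-down pop loop with a read-only forward scan keeping the last index whose score is >= player_position, then one slice delete reproducing A's pops; equivalence is about the return value, and B performs the same net mutation of ranked.
-- outside the precondition, e.g. on get_new_position(1, [5, 3], -2): A returns 0, B returns 1; on get_new_position(1, [5, 3], 7): A raises IndexError, B raises IndexError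
import Mathlib
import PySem

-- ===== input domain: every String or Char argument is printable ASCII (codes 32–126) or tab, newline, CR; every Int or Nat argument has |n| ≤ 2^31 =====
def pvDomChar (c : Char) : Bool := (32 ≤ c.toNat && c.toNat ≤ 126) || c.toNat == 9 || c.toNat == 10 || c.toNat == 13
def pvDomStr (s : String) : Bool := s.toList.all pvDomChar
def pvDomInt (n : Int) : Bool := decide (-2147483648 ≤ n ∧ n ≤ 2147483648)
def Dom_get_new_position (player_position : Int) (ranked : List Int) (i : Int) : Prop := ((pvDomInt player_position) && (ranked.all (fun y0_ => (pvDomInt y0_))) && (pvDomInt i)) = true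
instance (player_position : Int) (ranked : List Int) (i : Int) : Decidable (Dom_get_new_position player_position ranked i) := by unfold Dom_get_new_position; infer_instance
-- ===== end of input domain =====

-- B replaces A's destructive top-down pop loop by a read-only forward scan plus one slice
-- delete (objective: alternative decomposition). A mutates `ranked` in place; the equivalence
-- proved here is about the RETURN value only (B's Python performs the same net mutation).

-- ===== PORT A =====
-- Literal port of A's while-loop: read ranked[i]; on p < / p = return; else pop(i), i -= 1.
-- On an IndexError (pyGet?/pop? = none, excluded by Pre_) the port returns 0.
def get_new_position (player_position : Int) (ranked : List Int) (i : Int) : Int :=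
  if i = -1 then 1
  else
    match PySem.List.pyGet? ranked i with
    | none => 0
    | some v =>
      if player_position < v then i + 2
      else if player_position = v then i + 1
      else
        match h2 : PySem.List.pop? ranked i with
        | none => 0
        | some r => get_new_position player_position r.2 (i - 1)
termination_by ranked.length
decreasing_by
  have := PySem.List.length_of_pop?_eq_some ranked h2; omega

-- ===== PORT B =====
-- Literal port of Source B: forward scan j := last k in range(i+1) with p ≤ ranked[k] (else -1),
-- then the return cases.  Source B's `del ranked[j+1:i+1]` only removes indices > j, so the later
-- read ranked[j] equals the original list's ranked[j]; the port reads the original list there,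
-- which is exact.  ranked[k] is read with default 0 (in range for every k under Pre_).
def get_new_position_alt (player_position : Int) (ranked : List Int) (i : Int) : Int :=
  let j := (PySem.List.pyRange 0 (i + 1) 1).foldl
    (fun j k => if player_position ≤ PySem.List.pyGetD ranked k 0 then k else j) (-1)
  if j = -1 then 1
  else if player_position = PySem.List.pyGetD ranked j 0 then j + 1 else j + 2

-- ===== PRECONDITION & SPEC =====
-- Pre_ is the natural domain: i a valid position (or -1).  It excludes i ≥ len(ranked), where A
-- raises IndexError, and i < -1, where A's behaviour (raise or return) is an accident of
-- Python's negative-index wraparound, outside the function's natural domain.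
def Pre_get_new_position (player_position : Int) (ranked : List Int) (i : Int) : Prop :=
  -1 ≤ i ∧ i < ranked.length
instance (player_position : Int) (ranked : List Int) (i : Int) : Decidable (Pre_get_new_position player_position ranked i) := by unfold Pre_get_new_position; infer_instance

def pvWitness_get_new_position : Int × List Int × Int := (5, [10, 7, 3], 2)

def Spec_get_new_position (player_position : Int) (ranked : List Int) (i : Int) (out : Int) : Prop := out = get_new_position_alt player_position ranked i
instance (player_position : Int) (ranked : List Int) (i : Int) (out : Int) : Decidable (Spec_get_new_position player_position ranked i out) := by unfold Spec_get_new_position; infer_instance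

-- ===== CLAIM (what is proved, stated in full; the proofs are below) =====
def Claim_equal_get_new_position : Prop := ∀ (player_position : Int) (ranked : List Int) (i : Int), Dom_get_new_position player_position ranked i → Pre_get_new_position player_position ranked i → Spec_get_new_position player_position ranked i (get_new_position player_position ranked i)

-- ===== LEMMAS AND PROOFS =====

-- Reference backward scan over the ORIGINAL list, at natural depth n (i.e. i = n - 1).
def bref (p : Int) (ranked : List Int) : Nat → Int
  | 0 => 1
  | n + 1 =>
    let v := ranked.getD n 0
    if p < v then (n : Int) + 2
    else if p = v then (n : Int) + 1
    else bref p ranked n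

theorem bref_congr (p : Int) (xs ys : List Int) (n : Nat)
    (h : ∀ k, k < n → xs.getD k 0 = ys.getD k 0) : bref p xs n = bref p ys n := by
  induction n with
  | zero => rfl
  | succ n ih =>
    simp only [bref, h n (Nat.lt_succ_self n)]
    rw [ih (fun k hk => h k (Nat.lt_succ_of_lt hk))]

theorem A_eq_bref (p : Int) (n : Nat) : ∀ (ranked : List Int), n ≤ ranked.length →
    get_new_position p ranked ((n : Int) - 1) = bref p ranked n := by
  induction n with
  | zero => intro ranked _; rw [get_new_position.eq_def]; norm_num [bref]
  | succ n ih =>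
    intro ranked hlen
    have hn : n < ranked.length := by omega
    have hcast : ((n + 1 : Nat) : Int) - 1 = (n : Int) := by push_cast; ring
    rw [hcast, get_new_position.eq_def]
    simp only [PySem.List.pyGet?_ofNat ranked n hn]
    rw [if_neg (show ¬((n : Int) = -1) by omega)]
    simp only [bref, List.getD_eq_getElem ranked 0 hn]
    by_cases h1 : p < ranked[n]
    · rw [if_pos h1, if_pos h1]
    · rw [if_neg h1, if_neg h1]
      by_cases h2 : p = ranked[n]
      · rw [if_pos h2, if_pos h2]
      · rw [if_neg h2, if_neg h2]
        have hlen' : n ≤ (ranked.eraseIdx n).length := by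
          rw [List.length_eraseIdx_of_lt hn]; omega
        split
        · rename_i heq
          rw [PySem.List.pop?_natCast ranked n hn] at heq
          exact absurd heq (by simp)
        · rename_i r heq
          rw [PySem.List.pop?_natCast ranked n hn] at heq
          injection heq with h
          subst h
          rw [ih (ranked.eraseIdx n) hlen']
          apply bref_congr
          intro k hk
          have hk' : k < (ranked.eraseIdx n).length := by omega
          have hkr : k < ranked.length := by omega
          rw [List.getD_eq_getElem _ 0 hk', List.getD_eq_getElem _ 0 hkr]
          simp [List.getElem_eraseIdx, hk]

theorem B_eq_bref (p : Int) (ranked : List Int) (n : Nat) :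
    get_new_position_alt p ranked ((n : Int) - 1) = bref p ranked n := by
  induction n with
  | zero =>
    rw [get_new_position_alt]
    norm_num [PySem.List.pyRange_one_eq_nil, bref]
  | succ n ih =>
    have hcast : ((n + 1 : Nat) : Int) - 1 + 1 = (n : Int) + 1 := by push_cast; ring
    have hcast' : ((n : Nat) : Int) - 1 + 1 = (n : Int) := by ring
    rw [get_new_position_alt] at ih ⊢
    rw [hcast'] at ih
    rw [hcast, PySem.List.pyRange_one_succ_right (by omega : (0 : Int) ≤ (n : Int)),
      List.foldl_append]
    simp only [List.foldl_cons, List.foldl_nil, PySem.List.pyGetD_natCast] at ih ⊢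
    simp only [bref]
    by_cases h1 : p ≤ ranked.getD n 0
    · rw [if_pos h1, if_neg (show ¬((n : Int) = -1) by omega),
        PySem.List.pyGetD_natCast]
      by_cases h2 : p < ranked.getD n 0
      · rw [if_neg (show ¬(p = ranked.getD n 0) by omega), if_pos h2]
      · have h3 : p = ranked.getD n 0 := le_antisymm h1 (not_lt.mp h2)
        rw [if_pos h3, if_neg h2, if_pos h3]
    · rw [if_neg h1, if_neg (show ¬(p < ranked.getD n 0) by omega),
        if_neg (show ¬(p = ranked.getD n 0) by omega)]
      exact ih

-- ===== VERDICT (by name: the statement is the Claim_ definition above) =====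
theorem get_new_position_spec : Claim_equal_get_new_position := by
  intro p ranked i _ hpre
  obtain ⟨h1, h2⟩ := hpre
  unfold Spec_get_new_position
  have hn : i = ((i + 1).toNat : Int) - 1 := by omega
  rw [hn, A_eq_bref p (i + 1).toNat ranked (by omega), B_eq_bref]
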